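-- pv_equiv track=rewrite | github.com/sheeeru/IsoCortex | ic/ingestion/extractor.py | _normalise_text_preserve_indent
-- ===== SOURCE A (Python) =====
-- import unicodedata
--
-- def _normalise_text_preserve_indent(text: str) -> str:
--     """
--     Normalise text while preserving leading whitespace (indentation).
--
--     Used for source code files where indentation is semantically
--     meaningful (e.g. Python blocks, C++ brace style).
--
--     Steps:
--       1. Unicode NFC normalisation.
--       2. Replace non-breaking spaces and zero-width characters.
--       3. Normalise all line endings to LF.
--       4. Strip *trailing* whitespace per line (keep leading).
--       5. Collapse 3+ consecutive blank lines to exactly 2.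
--       6. Strip overall leading/trailing whitespace.
--     """
--     if not text:
--         return ""
--
--     text = unicodedata.normalize("NFC", text)
--     text = (
--         text
--         .replace("\u00a0", " ")
--         .replace("\u200b", "")
--         .replace("\u200c", "")
--         .replace("\u200d", "")
--         .replace("\ufeff", "")
--         .replace("\r\n",  "\n")
--         .replace("\r",    "\n")
--     )
--
--     # Strip trailing whitespace only — preserve leading indentation
--     lines = [line.rstrip() for line in text.split("\n")]
--
--     collapsed:   list[str] = []
--     blank_count: int        = 0
--     for line in lines:
--         if line == "":
--             blank_count += 1
--             if blank_count <= 2: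
--                 collapsed.append(line)
--         else:
--             blank_count = 0
--             collapsed.append(line)
--
--     return "\n".join(collapsed).strip()
-- ===== SOURCE B (Python) =====
-- import unicodedata
--
--
-- def _normalise_text_preserve_indent(text: str) -> str:
--     """Normalise text preserving indentation, in ONE scan: instead of A's staged
--     pipeline (split into lines, rstrip each, blank-counting loop, join, strip),
--     walk the characters once with an output list and a buffer of pending
--     whitespace.  Whitespace before a newline is popped (per-line rstrip),
--     newline runs are capped at 3 when flushed before a visible character
--     (= at most 2 blank lines), pending whitespace before the first visible
--     character and after the last is simply dropped (the overall strip)."""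
--     if not text:
--         return ""
--
--     text = unicodedata.normalize("NFC", text)
--     text = (
--         text
--         .replace("\u00a0", " ")
--         .replace("\u200b", "")
--         .replace("\u200c", "")
--         .replace("\u200d", "")
--         .replace("\ufeff", "")
--         .replace("\r\n",  "\n")
--         .replace("\r",    "\n")
--     )
--
--     out: list[str] = []      # emitted text; never ends in whitespace
--     pending: list[str] = []  # whitespace seen since the last emitted character
--     for ch in text:
--         if ch == "\n":
--             while pending and pending[-1] != "\n":
--                 pending.pop()        # rstrip of the line that just ended
--             pending.append(ch)
--         elif ch.isspace():
--             pending.append(ch)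
--         else:
--             if out:                  # flush pending, capping newline runs at 3
--                 run = 0
--                 for w in pending:
--                     if w == "\n":
--                         run += 1
--                         if run <= 3:
--                             out.append(w)
--                     else:
--                         out.append(w)
--             pending = []
--             out.append(ch)
--     return "".join(out)              # trailing pending whitespace is dropped
-- ===== Notes on version B (the rewrite author's own statement) =====
-- stated objective: alternative
-- what changed: A's staged pipeline (split into lines, rstrip each line, a blank-line counting loop building a collapsed line list, join, final strip) is replaced by a single character-level state machine with an output list and a pending-whitespace buffer that performs the per-line rstrip, the blank-line collapsing and the outer strip in one scan, with no intermediate line list and no final strip call.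
import Mathlib
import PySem

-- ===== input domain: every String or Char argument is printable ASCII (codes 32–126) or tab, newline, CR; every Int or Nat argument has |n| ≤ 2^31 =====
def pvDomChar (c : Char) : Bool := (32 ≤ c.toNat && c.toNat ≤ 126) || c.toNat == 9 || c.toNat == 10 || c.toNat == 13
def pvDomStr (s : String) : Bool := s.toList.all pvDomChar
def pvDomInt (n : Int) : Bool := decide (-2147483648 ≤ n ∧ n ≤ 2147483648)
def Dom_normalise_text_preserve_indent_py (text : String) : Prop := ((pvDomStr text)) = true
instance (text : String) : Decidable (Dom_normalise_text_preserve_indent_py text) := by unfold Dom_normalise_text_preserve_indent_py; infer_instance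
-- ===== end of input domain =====

-- B replaces A's staged pipeline (split into lines, rstrip each, blank-counting loop over the
-- line list, join, final strip) by a single character pass with an output list and a
-- pending-whitespace buffer (objective: alternative, same cost).

-- ===== PORT A =====
-- shared preprocessing of both Pythons: unicodedata.normalize("NFC", ·) is the identity on the
-- ASCII input domain and is ported as the identity; the replace chain is ported literally
def pvPreprocess (text : String) : String :=
  PySem.Str.replace (PySem.Str.replace (PySem.Str.replace (PySem.Str.replace (PySem.Str.replace
    (PySem.Str.replace (PySem.Str.replace text "\u00A0" " ") "\u200B" "") "\u200C" "")
    "\u200D" "") "\uFEFF" "") "\r\n" "\n") "\r" "\n"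

def normalise_text_preserve_indent_py (text : String) : String :=
  if text = "" then ""
  else
    let lines := ((PySem.Str.split? (pvPreprocess text) "\n").getD []).map PySem.Str.rstrip
    let res := lines.foldl
      (fun (acc : List String × Int) line =>
        if line = "" then
          if acc.2 + 1 ≤ 2 then (acc.1 ++ [line], acc.2 + 1) else (acc.1, acc.2 + 1)
        else (acc.1 ++ [line], 0))
      ([], 0)
    PySem.Str.strip (PySem.Str.join "\n" res.1)

-- ===== PORT B =====
-- the `while pending and pending[-1] != '\n': pending.pop()` loop, acting on the REVERSED buffer
def pvPopRev : List Char → List Char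
  | [] => []
  | c :: cs => if c ≠ '\n' then pvPopRev cs else c :: cs

-- Source B's inner flush loop: append pending to out, keeping at most 3 consecutive '\n'
def pvFlush (out : List Char) (pending : List Char) : List Char :=
  (pending.foldl (fun (acc : List Char × Int) w =>
      if w = '\n' then
        if acc.2 + 1 ≤ 3 then (acc.1 ++ [w], acc.2 + 1) else (acc.1, acc.2 + 1)
      else (acc.1 ++ [w], 0)) (out, 0)).1

def normalise_text_preserve_indent_py_alt (text : String) : String :=
  if text = "" then ""
  else
    let res := (pvPreprocess text).toList.foldl
      (fun (st : List Char × List Char) ch =>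
        if ch = '\n' then (st.1, (pvPopRev st.2.reverse).reverse ++ [ch])
        else if PySem.Chars.isspace ch then (st.1, st.2 ++ [ch])
        else (if st.1 = [] then st.1 ++ [ch] else pvFlush st.1 st.2 ++ [ch], []))
      ([], [])
    String.ofList res.1

-- ===== PRECONDITION & SPEC =====
def Spec_normalise_text_preserve_indent_py (text : String) (out : String) : Prop := out = normalise_text_preserve_indent_py_alt text
instance (text : String) (out : String) : Decidable (Spec_normalise_text_preserve_indent_py text out) := by unfold Spec_normalise_text_preserve_indent_py; infer_instance

-- ===== CLAIM (what is proved, stated in full; the proofs are below) =====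
def Claim_equal_normalise_text_preserve_indent_py : Prop := ∀ (text : String), Dom_normalise_text_preserve_indent_py text → Spec_normalise_text_preserve_indent_py text (normalise_text_preserve_indent_py text)

-- ===== LEMMAS AND PROOFS =====

-- A's blank-line loop, as a structural recursion (j = blank lines seen since a non-blank line)
def pvCapA (j : Nat) : List (List Char) → List (List Char)
  | [] => []
  | l :: ls => if l = [] then (if j + 1 ≤ 2 then l :: pvCapA (j + 1) ls else pvCapA (j + 1) ls)
               else l :: pvCapA 0 ls

-- "\n".join with a separator also BEFORE the first part
def pvJp (m : List (List Char)) : List Char := (m.map (fun l => '\n' :: l)).flatten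

-- s.split("\n") as a structural recursion
def pvSplit : List Char → List (List Char)
  | [] => [[]]
  | c :: t => if c = '\n' then [] :: pvSplit t
              else match pvSplit t with
                   | [] => [[c]]
                   | p :: ps => (c :: p) :: ps

def pvNl (k : Nat) : List Char := List.replicate k '\n'

-- what remains of A's line list after the counting loop, rendered: k = pending '\n' count
def pvT (k : Nat) : List (List Char) → List Char
  | [] => []
  | l :: ls => if l = [] then pvT (k + 1) ls
               else pvNl (min k 3) ++ l ++ pvT 1 ls

def pvH : List (List Char) → List Char
  | [] => []
  | l :: ls => if l = [] then pvH ls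
               else PySem.Chars.lstrip l ++ pvT 1 ls

-- B's state machine as a structural recursion over the remaining characters
def pvM (out pending : List Char) : List Char → List Char
  | [] => out
  | c :: cs =>
      if c = '\n' then pvM out ((pvPopRev pending.reverse).reverse ++ ['\n']) cs
      else if PySem.Chars.isspace c then pvM out (pending ++ [c]) cs
      else pvM (if out = [] then out ++ [c] else pvFlush out pending ++ [c]) [] cs

-- B's machine at line granularity
def pvMRec (out : List Char) (k : Nat) : List (List Char) → List Char
  | [] => out
  | l :: ls =>
      if PySem.Chars.rstrip l = [] then pvMRec out (k + 1) ls
      else pvMRec (if out = [] then PySem.Chars.lstrip (PySem.Chars.rstrip l)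
                   else out ++ pvNl (min k 3) ++ PySem.Chars.rstrip l) 1 ls

-- the whitespace suffix a line leaves in the pending buffer
def pvWsSuf (l : List Char) : List Char := (l.reverse.takeWhile PySem.Chars.isspace).reverse

theorem pvCapA_cons (j : Nat) (l : List Char) (ls : List (List Char)) :
    pvCapA j (l :: ls) = if l = [] then (if j + 1 ≤ 2 then l :: pvCapA (j + 1) ls else pvCapA (j + 1) ls)
               else l :: pvCapA 0 ls := rfl

theorem pvSplit_ne_nil (s : List Char) : pvSplit s ≠ [] := by
  induction s with
  | nil => simp [pvSplit]
  | cons c t ih =>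
    unfold pvSplit
    split
    · simp
    · split <;> simp

theorem pvSplit_nlfree (s : List Char) : ∀ l ∈ pvSplit s, '\n' ∉ l := by
  induction s with
  | nil => simp [pvSplit]
  | cons c t ih =>
    unfold pvSplit
    split
    · rintro l hl
      rcases List.mem_cons.mp hl with h | h
      · simp [h]
      · exact ih l h
    · rename_i hc
      split
      · rename_i heq
        exact absurd heq (pvSplit_ne_nil t)
      · rename_i p ps heq
        rintro l hl
        rcases List.mem_cons.mp hl with h | h
        · subst h
          intro hm
          rcases List.mem_cons.mp hm with h | h
          · exact hc h.symm
          · exact ih p (by rw [heq]; exact List.mem_cons_self ..) h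
        · exact ih l (by rw [heq]; exact List.mem_cons_of_mem _ h)

theorem pv_go_eq (fuel : Nat) : ∀ (l cur : List Char) (acc : List (List Char)),
    l.length < fuel →
    PySem.Chars.splitOn.go ['\n'] fuel l cur acc
      = acc.reverse ++ (cur.reverse ++ (pvSplit l).headI) :: (pvSplit l).tail := by
  induction fuel with
  | zero => intro l cur acc h; exact absurd h (by omega)
  | succ n ih =>
    intro l cur acc h
    match l with
    | [] => simp [PySem.Chars.splitOn.go, pvSplit]
    | c :: rest =>
      rw [PySem.Chars.splitOn.go]
      by_cases hc : c = '\n'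
      · have hpre : List.isPrefixOf ['\n'] (c :: rest) = true := by
          simp [List.isPrefixOf, hc]
        rw [if_pos hpre]
        have : List.drop (List.length ['\n']) (c :: rest) = rest := by simp
        rw [this]
        rw [ih rest [] (cur.reverse :: acc) (by simp at h; omega)]
        have hs : pvSplit (c :: rest) = [] :: pvSplit rest := by
          rw [pvSplit.eq_def]
          simp only []
          rw [if_pos hc]
        rw [hs]
        rcases hne : pvSplit rest with _ | ⟨p, ps⟩
        · exact absurd hne (pvSplit_ne_nil rest)
        · simp
      · have hpre : List.isPrefixOf ['\n'] (c :: rest) = false := by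
          simp [List.isPrefixOf]; exact fun hh => hc hh.symm
        rw [if_neg (by simp [hpre])]
        rw [ih rest (c :: cur) acc (by simp at h; omega)]
        have hs : pvSplit (c :: rest) = match pvSplit rest with
                   | [] => [[c]]
                   | p :: ps => (c :: p) :: ps := by
          rw [pvSplit.eq_def]
          simp only []
          rw [if_neg hc]
        rcases hne : pvSplit rest with _ | ⟨p, ps⟩
        · exact absurd hne (pvSplit_ne_nil rest)
        · rw [hs, hne]
          simp

theorem pv_splitOn_eq (s : List Char) : PySem.Chars.splitOn s ['\n'] = pvSplit s := by
  unfold PySem.Chars.splitOn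
  rw [pv_go_eq (s.length + 1) s [] [] (by omega)]
  rcases hne : pvSplit s with _ | ⟨p, ps⟩
  · exact absurd hne (pvSplit_ne_nil s)
  · simp

theorem pv_rstrip_append (u v : List Char) :
    PySem.Chars.rstrip (u ++ v)
      = if PySem.Chars.rstrip v = [] then PySem.Chars.rstrip u else u ++ PySem.Chars.rstrip v := by
  unfold PySem.Chars.rstrip
  rw [List.reverse_append, List.dropWhile_append]
  by_cases h : (List.dropWhile PySem.Chars.isspace v.reverse).isEmpty = true
  · rw [if_pos h]
    have : (List.dropWhile PySem.Chars.isspace v.reverse).reverse = [] := by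
      simp [List.isEmpty_iff] at h; simpa using h
    rw [if_pos this]
  · rw [if_neg h]
    have h2 : ¬ ((List.dropWhile PySem.Chars.isspace v.reverse).reverse = []) := by
      simp [List.isEmpty_iff] at h; simp [h]
    rw [if_neg h2, List.reverse_append, List.reverse_reverse]

theorem pv_rstrip_singleton (c : Char) :
    PySem.Chars.rstrip [c] = if PySem.Chars.isspace c then [] else [c] := by
  unfold PySem.Chars.rstrip
  by_cases h : PySem.Chars.isspace c <;> simp [List.dropWhile, h]

theorem pv_rstrip_cons (c : Char) (x : List Char) :
    PySem.Chars.rstrip (c :: x)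
      = if PySem.Chars.rstrip x = [] then PySem.Chars.rstrip [c] else c :: PySem.Chars.rstrip x := by
  have := pv_rstrip_append [c] x
  simpa using this

theorem pv_lstrip_cons (c : Char) (x : List Char) (h : PySem.Chars.isspace c = true) :
    PySem.Chars.lstrip (c :: x) = PySem.Chars.lstrip x := by
  simp [PySem.Chars.lstrip, List.dropWhile, h]

theorem pv_lstrip_cons_neg (c : Char) (x : List Char) (h : PySem.Chars.isspace c = false) :
    PySem.Chars.lstrip (c :: x) = c :: x := by
  simp [PySem.Chars.lstrip, List.dropWhile, h]

theorem pv_strip_cons (c : Char) (x : List Char) (h : PySem.Chars.isspace c = true) :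
    PySem.Chars.strip (c :: x) = PySem.Chars.strip x := by
  simp [PySem.Chars.strip, pv_lstrip_cons c x h]

theorem pv_rstrip_lstrip (x : List Char) :
    PySem.Chars.rstrip (PySem.Chars.lstrip x) = PySem.Chars.lstrip (PySem.Chars.rstrip x) := by
  induction x with
  | nil => rfl
  | cons c cs ih =>
    by_cases h : PySem.Chars.isspace c = true
    · rw [pv_lstrip_cons c cs h, ih, pv_rstrip_cons]
      by_cases h2 : PySem.Chars.rstrip cs = []
      · rw [if_pos h2, pv_rstrip_singleton, if_pos h, h2]
      · rw [if_neg h2, pv_lstrip_cons c _ h]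
    · have h' : PySem.Chars.isspace c = false := by simpa using h
      rw [pv_lstrip_cons_neg c cs h', pv_rstrip_cons]
      by_cases h2 : PySem.Chars.rstrip cs = []
      · rw [if_pos h2, pv_rstrip_singleton, h', if_neg (by simp), pv_lstrip_cons_neg _ _ h']
      · rw [if_neg h2, pv_lstrip_cons_neg _ _ h']

theorem pv_rstrip_eq_nil_iff (l : List Char) :
    PySem.Chars.rstrip l = [] ↔ ∀ c ∈ l, PySem.Chars.isspace c = true := by
  unfold PySem.Chars.rstrip
  rw [List.reverse_eq_nil_iff, List.dropWhile_eq_nil_iff]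
  constructor
  · intro h c hc; exact h c (List.mem_reverse.mpr hc)
  · intro h c hc; exact h c (List.mem_reverse.mp hc)

theorem pv_lstrip_eq_nil_iff (l : List Char) :
    PySem.Chars.lstrip l = [] ↔ ∀ c ∈ l, PySem.Chars.isspace c = true := by
  unfold PySem.Chars.lstrip
  exact List.dropWhile_eq_nil_iff

theorem pv_dropWhile_idem (p : Char → Bool) (x : List Char) :
    List.dropWhile p (List.dropWhile p x) = List.dropWhile p x := by
  induction x with
  | nil => rfl
  | cons c cs ih =>
    by_cases hc : p c = true
    · simp only [List.dropWhile_cons, hc, if_true]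
      exact ih
    · simp [hc]

theorem pv_rstrip_idem (l : List Char) :
    PySem.Chars.rstrip (PySem.Chars.rstrip l) = PySem.Chars.rstrip l := by
  unfold PySem.Chars.rstrip
  rw [List.reverse_reverse]
  congr 1
  exact pv_dropWhile_idem ..

theorem pv_lstrip_append_of_ne (m x : List Char) (h : PySem.Chars.lstrip m ≠ []) :
    PySem.Chars.lstrip (m ++ x) = PySem.Chars.lstrip m ++ x := by
  induction m with
  | nil => exact absurd rfl h
  | cons c cs ih =>
    by_cases hc : PySem.Chars.isspace c = true
    · have h' : PySem.Chars.lstrip cs ≠ [] := by rwa [pv_lstrip_cons c cs hc] at h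
      rw [List.cons_append, pv_lstrip_cons c (cs ++ x) hc, pv_lstrip_cons c cs hc]
      exact ih h'
    · have hc' : PySem.Chars.isspace c = false := by simpa using hc
      rw [List.cons_append, pv_lstrip_cons_neg c (cs ++ x) hc', pv_lstrip_cons_neg c cs hc']
      simp

-- "\n".join(l :: xs) = l ++ (each further part preceded by '\n')
theorem pv_join_cons (l : List Char) (xs : List (List Char)) :
    PySem.Chars.join ['\n'] (l :: xs) = l ++ pvJp xs := by
  induction xs generalizing l with
  | nil => simp [PySem.Chars.join, List.intercalate, pvJp]
  | cons p ps ih =>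
    have h1 : PySem.Chars.join ['\n'] (l :: p :: ps) = l ++ ['\n'] ++ PySem.Chars.join ['\n'] (p :: ps) := by
      simp [PySem.Chars.join, List.intercalate, List.intersperse]
    rw [h1, ih p]
    simp [pvJp]

theorem pvJp_eq (m : List (List Char)) (h : m ≠ []) :
    pvJp m = '\n' :: PySem.Chars.join ['\n'] m := by
  rcases m with _ | ⟨l, ls⟩
  · exact absurd rfl h
  · rw [pv_join_cons]
    simp [pvJp]

theorem pv_join_split (s : List Char) : PySem.Chars.join ['\n'] (pvSplit s) = s := by
  induction s with
  | nil => simp [pvSplit, PySem.Chars.join, List.intercalate]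
  | cons c t ih =>
    by_cases hc : c = '\n'
    · have hs : pvSplit (c :: t) = [] :: pvSplit t := by
        rw [pvSplit.eq_def]; simp only []; rw [if_pos hc]
      rw [hs, pv_join_cons, pvJp_eq _ (pvSplit_ne_nil t), ih]
      simp [hc]
    · rcases hne : pvSplit t with _ | ⟨p, ps⟩
      · exact absurd hne (pvSplit_ne_nil t)
      · have hs : pvSplit (c :: t) = (c :: p) :: ps := by
          rw [pvSplit.eq_def]; simp only []; rw [if_neg hc, hne]
        rw [hs, pv_join_cons]
        rw [hne, pv_join_cons] at ih
        rw [List.cons_append, ih]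

-- ==== A-side: the counting loop at line level ====

theorem pv_foldlA (cls : List (List Char)) : ∀ (acc : List String) (j : Nat),
    ((cls.map String.ofList).foldl (fun (acc : List String × Int) line =>
        if line = "" then
          if acc.2 + 1 ≤ 2 then (acc.1 ++ [line], acc.2 + 1) else (acc.1, acc.2 + 1)
        else (acc.1 ++ [line], 0)) (acc, (j : Int))).1 = acc ++ (pvCapA j cls).map String.ofList := by
  induction cls with
  | nil => intro acc j; simp [pvCapA]
  | cons l ls ih =>
    intro acc j
    have hiff : (String.ofList l = "") ↔ l = [] := by
      constructor
      · intro h; have := congrArg String.toList h; simpa using this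
      · rintro rfl; rfl
    rw [List.map_cons, List.foldl_cons, pvCapA_cons]
    simp only []
    by_cases hl : l = []
    · rw [if_pos (hiff.mpr hl), if_pos hl]
      have hcast : ((j : Int) + 1) = ((j + 1 : Nat) : Int) := by push_cast; ring
      by_cases h2 : j + 1 ≤ 2
      · rw [if_pos (by exact_mod_cast h2), if_pos h2, hcast]
        have h0 := ih (acc ++ [String.ofList l]) (j + 1)
        rw [h0, List.map_cons]
        simp
      · rw [if_neg (by exact_mod_cast h2), if_neg h2, hcast]
        exact ih acc (j + 1)
    · rw [if_neg (fun h => hl (hiff.mp h)), if_neg hl, List.map_cons]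
      have h0 := ih (acc ++ [String.ofList l]) 0
      rw [show ((0 : Nat) : Int) = (0 : Int) from rfl] at h0
      rw [h0]
      simp

theorem pv_replicate_snoc (k : Nat) (y : List Char) :
    List.replicate k '\n' ++ '\n' :: y = List.replicate (k + 1) '\n' ++ y := by
  rw [List.replicate_succ']
  simp

-- A's kept suffix, rstripped, against the pvT rendering
theorem pvLB (ls : List (List Char)) (hstr : ∀ l ∈ ls, PySem.Chars.rstrip l = l) : ∀ (j : Nat),
    pvT (j + 1) ls = if PySem.Chars.rstrip (pvJp (pvCapA j ls)) = [] then []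
                     else pvNl (min j 2) ++ PySem.Chars.rstrip (pvJp (pvCapA j ls)) := by
  induction ls with
  | nil =>
    intro j
    show pvT (j + 1) [] = _
    have h0 : pvCapA j [] = [] := rfl
    rw [h0]
    show ([] : List Char) = if PySem.Chars.rstrip (pvJp []) = [] then [] else _
    rw [show pvJp ([] : List (List Char)) = [] from rfl,
        show PySem.Chars.rstrip [] = [] from rfl, if_pos rfl]
  | cons l ls ih =>
    intro j
    have hstr' : ∀ x ∈ ls, PySem.Chars.rstrip x = x := fun x hx => hstr x (List.mem_cons_of_mem _ hx)
    by_cases hl : l = []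
    · subst hl
      have hT : pvT (j + 1) ([] :: ls) = pvT (j + 2) ls := rfl
      rw [hT, pvCapA_cons, if_pos rfl]
      set Y := PySem.Chars.rstrip (pvJp (pvCapA (j + 1) ls)) with hY
      by_cases h2 : j + 1 ≤ 2
      · rw [if_pos h2]
        have hjp : pvJp ([] :: pvCapA (j + 1) ls) = '\n' :: pvJp (pvCapA (j + 1) ls) := by
          simp [pvJp]
        rw [hjp, pv_rstrip_cons]
        by_cases hYe : Y = []
        · rw [if_pos hYe, pv_rstrip_singleton, if_pos (by decide)]
          have := ih hstr' (j + 1)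
          rw [if_pos hYe] at this
          simpa using this
        · rw [if_neg hYe]
          have hne2 : ('\n' :: Y) ≠ [] := by simp
          rw [if_neg hne2]
          have := ih hstr' (j + 1)
          rw [← hY, if_neg hYe] at this
          rw [this]
          show pvNl (min (j + 1) 2) ++ Y = pvNl (min j 2) ++ '\n' :: Y
          have : min (j + 1) 2 = min j 2 + 1 := by omega
          rw [this]
          exact (pv_replicate_snoc (min j 2) Y).symm
      · rw [if_neg h2]
        have := ih hstr' (j + 1)
        rw [this]
        have : min (j + 1) 2 = min j 2 := by omega
        rw [this]
    · have hT : pvT (j + 1) (l :: ls) = pvNl (min (j + 1) 3) ++ l ++ pvT 1 ls := by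
        rw [pvT.eq_def]; simp only []; rw [if_neg hl]
      rw [hT, pvCapA_cons, if_neg hl]
      have hjp : pvJp (l :: pvCapA 0 ls) = ('\n' :: l) ++ pvJp (pvCapA 0 ls) := by
        simp [pvJp]
      rw [hjp, pv_rstrip_append]
      set Z := PySem.Chars.rstrip (pvJp (pvCapA 0 ls)) with hZ
      have hZT : pvT 1 ls = Z ∨ (pvT 1 ls = [] ∧ Z = []) := by
        have := ih hstr' 0
        rw [← hZ] at this
        by_cases hZe : Z = []
        · right; rw [if_pos hZe] at this; exact ⟨this, hZe⟩
        · left; rw [if_neg hZe] at this; simpa using this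
      have hrl : PySem.Chars.rstrip ('\n' :: l) = '\n' :: l := by
        rw [pv_rstrip_cons, hstr l (List.mem_cons_self ..), if_neg hl]
      have hmin : min (j + 1) 3 = min j 2 + 1 := by omega
      by_cases hZe : Z = []
      · rw [if_pos hZe, hrl, if_neg (by simp)]
        rcases hZT with h | ⟨h1, _⟩
        · rw [h, hZe, hmin]
          simp [pvNl, List.replicate_succ', List.append_assoc]
        · rw [h1, hmin]
          simp [pvNl, List.replicate_succ', List.append_assoc]
      · rw [if_neg hZe]
        have : ('\n' :: l ++ Z) ≠ [] := by simp
        rw [if_neg this]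
        rcases hZT with h | ⟨_, h2⟩
        · rw [h, hmin]
          simp [pvNl, List.replicate_succ', List.append_assoc]
        · exact absurd h2 hZe

theorem pvHA (rs : List (List Char)) (hstr : ∀ l ∈ rs, PySem.Chars.rstrip l = l) : ∀ (j : Nat),
    PySem.Chars.strip (PySem.Chars.join ['\n'] (pvCapA j rs)) = pvH rs := by
  induction rs with
  | nil =>
    intro j
    have h0 : pvCapA j [] = [] := rfl
    rw [h0]
    rfl
  | cons l ls ih =>
    intro j
    have hstr' : ∀ x ∈ ls, PySem.Chars.rstrip x = x := fun x hx => hstr x (List.mem_cons_of_mem _ hx)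
    by_cases hl : l = []
    · subst hl
      have hH : pvH ([] :: ls) = pvH ls := rfl
      rw [hH, pvCapA_cons, if_pos rfl]
      have key : ∀ (x : List (List Char)),
          PySem.Chars.strip (PySem.Chars.join ['\n'] ([] :: x)) = PySem.Chars.strip (PySem.Chars.join ['\n'] x) := by
        intro x
        rcases hx : x with _ | ⟨p, ps⟩
        · rfl
        · rw [← hx, pv_join_cons, List.nil_append, pvJp_eq x (by rw [hx]; simp),
              pv_strip_cons _ _ (by decide)]
      by_cases h2 : j + 1 ≤ 2
      · rw [if_pos h2, key, ih hstr' (j + 1)]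
      · rw [if_neg h2, ih hstr' (j + 1)]
    · have hH : pvH (l :: ls) = PySem.Chars.lstrip l ++ pvT 1 ls := by
        rw [pvH.eq_def]; simp only []; rw [if_neg hl]
      rw [hH, pvCapA_cons, if_neg hl, pv_join_cons]
      have hrl : PySem.Chars.rstrip l = l := hstr l (List.mem_cons_self ..)
      have hlne : PySem.Chars.lstrip l ≠ [] := by
        intro hcon
        have : PySem.Chars.rstrip l = [] := by
          rw [pv_rstrip_eq_nil_iff]
          exact (pv_lstrip_eq_nil_iff l).mp hcon
        rw [hrl] at this
        exact hl this
      have hs : PySem.Chars.strip (l ++ pvJp (pvCapA 0 ls))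
          = PySem.Chars.rstrip (PySem.Chars.lstrip l ++ pvJp (pvCapA 0 ls)) := by
        unfold PySem.Chars.strip
        rw [pv_lstrip_append_of_ne _ _ hlne]
      rw [hs, pv_rstrip_append]
      set Z := PySem.Chars.rstrip (pvJp (pvCapA 0 ls)) with hZ
      have hT := pvLB ls hstr' 0
      rw [← hZ] at hT
      by_cases hZe : Z = []
      · rw [if_pos hZe]
        rw [if_pos hZe] at hT
        rw [pv_rstrip_lstrip, hrl, hT]
        simp
      · rw [if_neg hZe]
        rw [if_neg hZe] at hT
        simp [pvNl] at hT
        rw [hT]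

-- ==== B-side: the machine ====

theorem pv_foldlB (cs : List Char) : ∀ (out pending : List Char),
    (cs.foldl (fun (st : List Char × List Char) ch =>
        if ch = '\n' then (st.1, (pvPopRev st.2.reverse).reverse ++ [ch])
        else if PySem.Chars.isspace ch then (st.1, st.2 ++ [ch])
        else (if st.1 = [] then st.1 ++ [ch] else pvFlush st.1 st.2 ++ [ch], [])) (out, pending)).1
      = pvM out pending cs := by
  induction cs with
  | nil => intro out pending; rfl
  | cons c cs ih =>
    intro out pending
    rw [List.foldl_cons, pvM.eq_def]
    by_cases hc : c = '\n'
    · subst hc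
      simp only [reduceIte]
      exact ih ..
    · by_cases hs : PySem.Chars.isspace c = true
      · simp only [if_neg hc, if_pos hs]
        exact ih ..
      · simp only [if_neg hc, if_neg hs]
        exact ih ..

theorem pv_popRev_no_nl (y z : List Char) (h : '\n' ∉ y) : pvPopRev (y ++ z) = pvPopRev z := by
  induction y with
  | nil => rfl
  | cons c cs ih =>
    have hc : c ≠ '\n' := fun hh => h (by simp [hh])
    rw [List.cons_append, pvPopRev.eq_def]
    simp only [if_pos hc]
    exact ih (fun hm => h (List.mem_cons_of_mem _ hm))

theorem pv_popRev_nl (k : Nat) (x : List Char) (h : '\n' ∉ x) :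
    (pvPopRev (pvNl k ++ x).reverse).reverse = pvNl k := by
  rw [List.reverse_append]
  rw [pv_popRev_no_nl x.reverse _ (by simpa using h)]
  have hrep : (pvNl k).reverse = pvNl k := by simp [pvNl]
  rw [hrep]
  rcases k with _ | k
  · rfl
  · have : pvNl (k + 1) = '\n' :: pvNl k := by simp [pvNl, List.replicate_succ]
    rw [this, pvPopRev.eq_def]
    simp only [if_neg (by simp : ¬ ('\n' ≠ '\n'))]
    rw [← this, hrep]

theorem pv_flush_no_nl (w : List Char) (h : '\n' ∉ w) : ∀ (out : List Char) (j : Int),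
    (w.foldl (fun (acc : List Char × Int) w =>
        if w = '\n' then
          if acc.2 + 1 ≤ 3 then (acc.1 ++ [w], acc.2 + 1) else (acc.1, acc.2 + 1)
        else (acc.1 ++ [w], 0)) (out, j)).1 = out ++ w := by
  induction w with
  | nil => intro out j; simp
  | cons c cs ih =>
    intro out j
    have hc : ¬ (c = '\n') := fun hh => h (by simp [hh])
    rw [List.foldl_cons]
    simp only [if_neg hc]
    rw [ih (fun hm => h (List.mem_cons_of_mem _ hm)) (out ++ [c]) 0]
    simp

theorem pv_flush_rep (k : Nat) : ∀ (out : List Char) (j : Int), 0 ≤ j →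
    (pvNl k).foldl (fun (acc : List Char × Int) w =>
        if w = '\n' then
          if acc.2 + 1 ≤ 3 then (acc.1 ++ [w], acc.2 + 1) else (acc.1, acc.2 + 1)
        else (acc.1 ++ [w], 0)) (out, j)
      = (out ++ pvNl (min k (3 - j).toNat), j + k) := by
  induction k with
  | zero => intro out j hj; simp [pvNl]
  | succ k ih =>
    intro out j hj
    have hrep : pvNl (k + 1) = '\n' :: pvNl k := by simp [pvNl, List.replicate_succ]
    rw [hrep, List.foldl_cons, if_pos rfl]
    by_cases h3 : j + 1 ≤ 3
    · rw [if_pos h3, ih (out ++ ['\n']) (j + 1) (by omega)]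
      have hmin : min (k + 1) (3 - j).toNat = min k (3 - (j + 1)).toNat + 1 := by omega
      rw [hmin, Prod.mk.injEq]
      constructor
      · show out ++ ['\n'] ++ pvNl (min k (3 - (j + 1)).toNat) = out ++ pvNl (min k (3 - (j + 1)).toNat + 1)
        have : pvNl (min k (3 - (j + 1)).toNat + 1) = '\n' :: pvNl (min k (3 - (j + 1)).toNat) := by
          simp [pvNl, List.replicate_succ]
        rw [this]
        simp
      · show j + 1 + (k : Int) = j + (k + 1 : Nat)
        push_cast; ring
    · rw [if_neg h3, ih out (j + 1) (by omega)]
      have hz1 : (3 - (j + 1)).toNat = 0 := by omega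
      have hz2 : min (k + 1) (3 - j).toNat = 0 := by omega
      rw [hz1, hz2, Prod.mk.injEq]
      constructor
      · simp [pvNl]
      · show j + 1 + (k : Int) = j + (k + 1 : Nat)
        push_cast; ring

theorem pv_flush_eq (out : List Char) (k : Nat) (w : List Char) (hw : '\n' ∉ w) :
    pvFlush out (pvNl k ++ w) = out ++ pvNl (min k 3) ++ w := by
  unfold pvFlush
  rw [List.foldl_append, pv_flush_rep k out 0 (by omega)]
  rw [pv_flush_no_nl w hw]
  have : (3 - (0 : Int)).toNat = 3 := by omega
  rw [this]

theorem pv_takeWhile_append_of (p : Char → Bool) (y z : List Char) (h : List.dropWhile p y ≠ []) :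
    List.takeWhile p (y ++ z) = List.takeWhile p y := by
  induction y with
  | nil => exact absurd rfl h
  | cons a y' ih =>
    by_cases ha : p a = true
    · rw [List.cons_append, List.takeWhile_cons, if_pos ha, List.takeWhile_cons, if_pos ha]
      rw [ih (by rwa [List.dropWhile_cons, if_pos ha] at h)]
    · rw [List.cons_append, List.takeWhile_cons, if_neg ha, List.takeWhile_cons, if_neg ha]

theorem pv_takeWhile_append_all (p : Char → Bool) (y z : List Char) (h : ∀ x ∈ y, p x = true) :
    List.takeWhile p (y ++ z) = y ++ List.takeWhile p z := by
  induction y with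
  | nil => simp
  | cons a y' ih =>
    rw [List.cons_append, List.takeWhile_cons, if_pos (h a (List.mem_cons_self ..)),
        List.cons_append, ih (fun x hx => h x (List.mem_cons_of_mem _ hx))]

theorem pv_wsSuf_cons_of_ne (c : Char) (l : List Char) (h : PySem.Chars.rstrip l ≠ []) :
    pvWsSuf (c :: l) = pvWsSuf l := by
  unfold pvWsSuf
  have hrev : (c :: l).reverse = l.reverse ++ [c] := by simp
  have hd : List.dropWhile PySem.Chars.isspace l.reverse ≠ [] := by
    intro hcon
    apply h
    unfold PySem.Chars.rstrip
    rw [hcon]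
    rfl
  rw [hrev, pv_takeWhile_append_of _ _ _ hd]

theorem pv_wsSuf_cons_allws (c : Char) (l : List Char) (hl : ∀ x ∈ l, PySem.Chars.isspace x = true)
    (hc : PySem.Chars.isspace c = false) : pvWsSuf (c :: l) = l := by
  unfold pvWsSuf
  have hrev : (c :: l).reverse = l.reverse ++ [c] := by simp
  rw [hrev, pv_takeWhile_append_all _ _ _ (fun x hx => hl x (List.mem_reverse.mp hx))]
  rw [List.takeWhile_cons, if_neg (by simp [hc])]
  simp

theorem pv_wsSuf_no_nl (l : List Char) (h : '\n' ∉ l) : '\n' ∉ pvWsSuf l := by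
  intro hm
  unfold pvWsSuf at hm
  rw [List.mem_reverse] at hm
  exact h (List.mem_reverse.mp ((List.takeWhile_sublist _).subset hm))

theorem pvM_cons (out pending : List Char) (c : Char) (cs : List Char) :
    pvM out pending (c :: cs)
      = if c = '\n' then pvM out ((pvPopRev pending.reverse).reverse ++ ['\n']) cs
        else if PySem.Chars.isspace c then pvM out (pending ++ [c]) cs
        else pvM (if out = [] then out ++ [c] else pvFlush out pending ++ [c]) [] cs := rfl

theorem pvMline (l : List Char) : '\n' ∉ l → ∀ (w : List Char), '\n' ∉ w →
    (∀ c ∈ w, PySem.Chars.isspace c = true) → ∀ (out : List Char) (k : Nat) (cs : List Char),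
    pvM out (pvNl k ++ w) (l ++ cs) =
      if PySem.Chars.rstrip l = [] then pvM out (pvNl k ++ w ++ l) cs
      else pvM (if out = [] then PySem.Chars.lstrip (PySem.Chars.rstrip l)
                else out ++ pvNl (min k 3) ++ w ++ PySem.Chars.rstrip l) (pvWsSuf l) cs := by
  induction l with
  | nil =>
    intro _ w _ _ out k cs
    rw [List.nil_append, show PySem.Chars.rstrip [] = [] from rfl, if_pos rfl, List.append_nil]
  | cons c l' ih =>
    intro hnl w hwnl hws out k cs
    have hc : ¬ (c = '\n') := fun h => hnl (by simp [h])
    have hnl' : '\n' ∉ l' := fun h => hnl (List.mem_cons_of_mem _ h)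
    rw [List.cons_append, pvM.eq_def]
    simp only [if_neg hc]
    by_cases hs : PySem.Chars.isspace c = true
    · rw [if_pos hs, List.append_assoc (pvNl k) w [c]]
      have hwnl2 : '\n' ∉ w ++ [c] := by
        intro hm
        rcases List.mem_append.mp hm with h | h
        · exact hwnl h
        · have hcc : '\n' = c := by simpa using h
          exact hc hcc.symm
      have hws2 : ∀ x ∈ w ++ [c], PySem.Chars.isspace x = true := by
        intro x hx
        rcases List.mem_append.mp hx with h | h
        · exact hws x h
        · have hxc : x = c := by simpa using h
          rw [hxc]; exact hs
      rw [ih hnl' (w ++ [c]) hwnl2 hws2 out k cs]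
      by_cases hb : PySem.Chars.rstrip l' = []
      · have h1 : PySem.Chars.rstrip (c :: l') = [] := by
          rw [pv_rstrip_cons, if_pos hb, pv_rstrip_singleton, if_pos hs]
        rw [if_pos hb, if_pos h1]
        have hpend : pvNl k ++ (w ++ [c]) ++ l' = pvNl k ++ w ++ (c :: l') := by
          simp [List.append_assoc]
        rw [hpend]
      · have h1 : PySem.Chars.rstrip (c :: l') = c :: PySem.Chars.rstrip l' := by
          rw [pv_rstrip_cons, if_neg hb]
        rw [if_neg hb,
            if_neg (show ¬ PySem.Chars.rstrip (c :: l') = [] by rw [h1]; simp)]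
        rw [pv_wsSuf_cons_of_ne c l' hb]
        have hout : (if out = [] then PySem.Chars.lstrip (PySem.Chars.rstrip l')
              else out ++ pvNl (min k 3) ++ (w ++ [c]) ++ PySem.Chars.rstrip l')
            = (if out = [] then PySem.Chars.lstrip (PySem.Chars.rstrip (c :: l'))
              else out ++ pvNl (min k 3) ++ w ++ PySem.Chars.rstrip (c :: l')) := by
          rw [h1, pv_lstrip_cons c _ hs]
          by_cases ho : out = []
          · simp [ho]
          · simp [ho, List.append_assoc]
        rw [hout]
    · rw [if_neg hs]
      have hflush : pvFlush out (pvNl k ++ w) = out ++ pvNl (min k 3) ++ w :=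
        pv_flush_eq out k w hwnl
      have hout1 : (if out = [] then out ++ [c] else pvFlush out (pvNl k ++ w) ++ [c])
          = (if out = [] then [c] else out ++ pvNl (min k 3) ++ w ++ [c]) := by
        by_cases ho : out = [] <;> simp [ho, hflush]
      rw [hout1]
      set out₁ := if out = [] then [c] else out ++ pvNl (min k 3) ++ w ++ [c] with hout₁
      have hne1 : out₁ ≠ [] := by
        rw [hout₁]; by_cases ho : out = [] <;> simp [ho]
      have hrec := ih hnl' [] (by simp) (by simp) out₁ 0 cs
      rw [show pvNl 0 ++ ([] : List Char) = [] from rfl] at hrec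
      rw [hrec]
      have hsF : PySem.Chars.isspace c = false := by simpa using hs
      by_cases hb : PySem.Chars.rstrip l' = []
      · have h1 : PySem.Chars.rstrip (c :: l') = [c] := by
          rw [pv_rstrip_cons, if_pos hb, pv_rstrip_singleton, if_neg hs]
        rw [if_pos hb,
            if_neg (show ¬ PySem.Chars.rstrip (c :: l') = [] by rw [h1]; simp)]
        rw [pv_wsSuf_cons_allws c l' ((pv_rstrip_eq_nil_iff l').mp hb) hsF]
        rw [List.nil_append]
        have hout : out₁ = (if out = [] then PySem.Chars.lstrip (PySem.Chars.rstrip (c :: l'))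
              else out ++ pvNl (min k 3) ++ w ++ PySem.Chars.rstrip (c :: l')) := by
          rw [h1, hout₁]
          by_cases ho : out = []
          · rw [if_pos ho, if_pos ho, pv_lstrip_cons_neg c [] hsF]
          · rw [if_neg ho, if_neg ho]
        rw [hout]
      · have h1 : PySem.Chars.rstrip (c :: l') = c :: PySem.Chars.rstrip l' := by
          rw [pv_rstrip_cons, if_neg hb]
        rw [if_neg hb,
            if_neg (show ¬ PySem.Chars.rstrip (c :: l') = [] by rw [h1]; simp)]
        rw [pv_wsSuf_cons_of_ne c l' hb, if_neg hne1]
        have hout : out₁ ++ pvNl (min 0 3) ++ ([] : List Char) ++ PySem.Chars.rstrip l'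
            = (if out = [] then PySem.Chars.lstrip (PySem.Chars.rstrip (c :: l'))
              else out ++ pvNl (min k 3) ++ w ++ PySem.Chars.rstrip (c :: l')) := by
          rw [h1, hout₁]
          by_cases ho : out = []
          · rw [if_pos ho, if_pos ho, pv_lstrip_cons_neg c _ hsF]
            simp [pvNl]
          · rw [if_neg ho, if_neg ho]
            simp [pvNl, List.append_assoc]
        rw [hout]

theorem pvMlines (ls : List (List Char)) : (∀ l ∈ ls, '\n' ∉ l) → ∀ (out : List Char) (k : Nat),
    pvM out (pvNl k) (PySem.Chars.join ['\n'] ls) = pvMRec out k ls := by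
  induction ls with
  | nil =>
    intro _ out k
    rw [show PySem.Chars.join ['\n'] ([] : List (List Char)) = [] from rfl]
    rfl
  | cons l ls ih =>
    intro h out k
    have hl : '\n' ∉ l := h l (List.mem_cons_self ..)
    have hls : ∀ x ∈ ls, '\n' ∉ x := fun x hx => h x (List.mem_cons_of_mem _ hx)
    rw [pv_join_cons]
    have hMRec : pvMRec out k (l :: ls)
        = if PySem.Chars.rstrip l = [] then pvMRec out (k + 1) ls
          else pvMRec (if out = [] then PySem.Chars.lstrip (PySem.Chars.rstrip l)
                       else out ++ pvNl (min k 3) ++ PySem.Chars.rstrip l) 1 ls := rfl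
    by_cases hE : ls = []
    · subst hE
      rw [show pvJp ([] : List (List Char)) = [] from rfl]
      have hline := pvMline l hl [] (by simp) (by simp) out k []
      rw [List.append_nil] at hline
      rw [List.append_nil] at hline
      rw [List.append_nil, hline, hMRec]
      by_cases hb : PySem.Chars.rstrip l = []
      · rw [if_pos hb, if_pos hb]; rfl
      · rw [if_neg hb, if_neg hb]
        show (if out = [] then PySem.Chars.lstrip (PySem.Chars.rstrip l)
              else out ++ pvNl (min k 3) ++ [] ++ PySem.Chars.rstrip l) = _
        by_cases ho : out = [] <;> simp [ho, pvMRec]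
    · rw [pvJp_eq ls hE]
      have hline := pvMline l hl [] (by simp) (by simp) out k ('\n' :: PySem.Chars.join ['\n'] ls)
      rw [List.append_nil] at hline
      rw [hline, hMRec]
      by_cases hb : PySem.Chars.rstrip l = []
      · rw [if_pos hb, if_pos hb]
        rw [pvM_cons, if_pos rfl]
        rw [pv_popRev_nl k l hl]
        rw [show pvNl k ++ ['\n'] = pvNl (k + 1) by simp [pvNl, List.replicate_succ']]
        exact ih hls out (k + 1)
      · rw [if_neg hb, if_neg hb]
        rw [pvM_cons, if_pos rfl]
        have hws : '\n' ∉ pvWsSuf l := pv_wsSuf_no_nl l hl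
        have hpop : (pvPopRev (pvWsSuf l).reverse).reverse = [] := by
          have h0 := pv_popRev_nl 0 (pvWsSuf l) hws
          simpa [pvNl] using h0
        rw [hpop, List.nil_append]
        have hXX : (if out = [] then PySem.Chars.lstrip (PySem.Chars.rstrip l)
              else out ++ pvNl (min k 3) ++ [] ++ PySem.Chars.rstrip l)
            = (if out = [] then PySem.Chars.lstrip (PySem.Chars.rstrip l)
              else out ++ pvNl (min k 3) ++ PySem.Chars.rstrip l) := by
          by_cases ho : out = [] <;> simp [ho]
        rw [hXX]
        exact ih hls _ 1

theorem pvMT (ls : List (List Char)) : ∀ (out : List Char) (k : Nat), out ≠ [] →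
    pvMRec out k ls = out ++ pvT k (ls.map PySem.Chars.rstrip) := by
  induction ls with
  | nil => intro out k _; simp [pvMRec, pvT]
  | cons l ls ih =>
    intro out k ho
    rw [List.map_cons]
    by_cases hb : PySem.Chars.rstrip l = []
    · rw [show pvMRec out k (l :: ls) = pvMRec out (k + 1) ls by rw [pvMRec.eq_def]; simp only []; rw [if_pos hb]]
      rw [show pvT k (PySem.Chars.rstrip l :: ls.map PySem.Chars.rstrip)
            = pvT (k + 1) (ls.map PySem.Chars.rstrip) by rw [pvT.eq_def]; simp only []; rw [if_pos hb]]
      exact ih out (k + 1) ho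
    · rw [show pvMRec out k (l :: ls)
            = pvMRec (out ++ pvNl (min k 3) ++ PySem.Chars.rstrip l) 1 ls by
          rw [pvMRec.eq_def]; simp [hb, ho]]
      rw [show pvT k (PySem.Chars.rstrip l :: ls.map PySem.Chars.rstrip)
            = pvNl (min k 3) ++ PySem.Chars.rstrip l ++ pvT 1 (ls.map PySem.Chars.rstrip) by
          rw [pvT.eq_def]; simp only []; rw [if_neg hb]]
      rw [ih _ 1 (by simp [ho])]
      simp [List.append_assoc]

theorem pvMH (ls : List (List Char)) : ∀ (k : Nat),
    pvMRec [] k ls = pvH (ls.map PySem.Chars.rstrip) := by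
  induction ls with
  | nil => intro k; rfl
  | cons l ls ih =>
    intro k
    rw [List.map_cons]
    by_cases hb : PySem.Chars.rstrip l = []
    · rw [show pvMRec [] k (l :: ls) = pvMRec [] (k + 1) ls by rw [pvMRec.eq_def]; simp only []; rw [if_pos hb]]
      rw [show pvH (PySem.Chars.rstrip l :: ls.map PySem.Chars.rstrip)
            = pvH (ls.map PySem.Chars.rstrip) by rw [pvH.eq_def]; simp only []; rw [if_pos hb]]
      exact ih (k + 1)
    · rw [show pvMRec [] k (l :: ls)
            = pvMRec (PySem.Chars.lstrip (PySem.Chars.rstrip l)) 1 ls by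
          rw [pvMRec.eq_def]; simp [hb]]
      rw [show pvH (PySem.Chars.rstrip l :: ls.map PySem.Chars.rstrip)
            = PySem.Chars.lstrip (PySem.Chars.rstrip l) ++ pvT 1 (ls.map PySem.Chars.rstrip) by
          rw [pvH.eq_def]; simp only []; rw [if_neg hb]]
      have hlne : PySem.Chars.lstrip (PySem.Chars.rstrip l) ≠ [] := by
        intro hcon
        apply hb
        rw [← pv_rstrip_idem l]
        rw [pv_rstrip_eq_nil_iff]
        exact (pv_lstrip_eq_nil_iff _).mp hcon
      exact pvMT ls _ 1 hlne

-- ==== assembly ====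

set_option maxHeartbeats 1000000 in
theorem pv_main_str (t : String) :
    PySem.Str.strip (PySem.Str.join "\n"
      ((((PySem.Str.split? t "\n").getD []).map PySem.Str.rstrip).foldl
        (fun (acc : List String × Int) line =>
          if line = "" then
            if acc.2 + 1 ≤ 2 then (acc.1 ++ [line], acc.2 + 1) else (acc.1, acc.2 + 1)
          else (acc.1 ++ [line], 0)) ([], 0)).1)
    = String.ofList (t.toList.foldl
        (fun (st : List Char × List Char) ch =>
          if ch = '\n' then (st.1, (pvPopRev st.2.reverse).reverse ++ [ch])
          else if PySem.Chars.isspace ch then (st.1, st.2 ++ [ch])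
          else (if st.1 = [] then st.1 ++ [ch] else pvFlush st.1 st.2 ++ [ch], [])) ([], [])).1 := by
  have hsplit : (PySem.Str.split? t "\n").getD [] = (pvSplit t.toList).map String.ofList := by
    simp [PySem.Str.split?, PySem.Chars.split?, pv_splitOn_eq]
  set rsL : List (List Char) := (pvSplit t.toList).map PySem.Chars.rstrip with hrsL
  have hlines : ((PySem.Str.split? t "\n").getD []).map PySem.Str.rstrip = rsL.map String.ofList := by
    rw [hsplit, List.map_map, List.map_map]
    apply List.map_congr_left
    intro l _
    simp [PySem.Str.rstrip]
  have hst : ∀ l ∈ rsL, PySem.Chars.rstrip l = l := by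
    intro l hl
    rw [hrsL] at hl
    rcases List.mem_map.mp hl with ⟨p, _, rfl⟩
    exact pv_rstrip_idem p
  have hA := pv_foldlA rsL [] 0
  rw [show ((0 : Nat) : Int) = (0 : Int) by norm_num] at hA
  rw [hlines, hA, List.nil_append]
  have hjoin : (PySem.Str.join "\n" ((pvCapA 0 rsL).map String.ofList)).toList
      = PySem.Chars.join ['\n'] (pvCapA 0 rsL) := by
    simp [PySem.Str.join, List.map_map]
    rw [show String.toList ∘ String.ofList = id from funext (fun l => by simp), List.map_id]
  have hB := pv_foldlB t.toList [] []
  rw [hB]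
  have hM : pvM [] [] t.toList = pvH rsL := by
    have h1 := pvMlines (pvSplit t.toList) (pvSplit_nlfree t.toList) [] 0
    rw [pv_join_split] at h1
    rw [show pvNl 0 = ([] : List Char) from rfl] at h1
    rw [h1, pvMH, hrsL]
  rw [hM]
  simp only [PySem.Str.strip]
  rw [hjoin]
  exact congrArg String.ofList (pvHA rsL hst 0)

-- ===== VERDICT (by name: the statement is the Claim_ definition above) =====
theorem normalise_text_preserve_indent_py_spec : Claim_equal_normalise_text_preserve_indent_py := by
  intro text _
  unfold Spec_normalise_text_preserve_indent_py
  unfold normalise_text_preserve_indent_py normalise_text_preserve_indent_py_alt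
  by_cases h : text = ""
  · simp [h]
  · simp only [if_neg h]
    exact pv_main_str (pvPreprocess text)
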